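-- pv_equiv track=rewrite | github.com/fogleman/AdventOfCode2023 | 11.py | empty_x
-- ===== SOURCE A (Python) =====
-- def empty_x(grid):
--     h = len(grid)
--     w = len(grid[0])
--     result = set()
--     for x in range(w):
--         col = [grid[y][x] for y in range(h)]
--         if all(c == '.' for c in col):
--             result.add(x)
--     return result
-- ===== SOURCE B (Python) =====
-- def empty_x(grid):
--     w = len(grid[0])
--     result = set(range(w))
--     for row in grid:
--         for x, c in enumerate(row):
--             if c != '.':
--                 result.discard(x)
--     return result
-- ===== Notes on version B (the rewrite author's own statement) =====
-- stated objective: alternative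
-- what changed: Replaces A's per-column scan (build each column, test all-'.') by a single row-major elimination pass that starts with every column as a candidate and discards a column the moment any non-'.' cell is seen in it.
import Mathlib
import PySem

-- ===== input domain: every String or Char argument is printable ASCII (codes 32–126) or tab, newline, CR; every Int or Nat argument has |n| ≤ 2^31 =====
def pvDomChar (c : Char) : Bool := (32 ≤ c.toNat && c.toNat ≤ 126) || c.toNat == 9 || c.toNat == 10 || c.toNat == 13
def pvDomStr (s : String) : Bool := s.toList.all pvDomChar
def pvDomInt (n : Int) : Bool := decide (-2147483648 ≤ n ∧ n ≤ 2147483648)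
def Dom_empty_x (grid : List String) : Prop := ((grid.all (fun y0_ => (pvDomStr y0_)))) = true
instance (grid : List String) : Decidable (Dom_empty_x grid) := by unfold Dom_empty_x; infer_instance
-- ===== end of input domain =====

-- B replaces A's per-column all-'.' scan by one row-major pass that eliminates columns from a candidate set; alternative decomposition, same cost.

-- ===== PORT A =====
def empty_x (grid : List String) : List Int :=
  let h : Int := (grid.length : Int)
  let w : Int := PySem.Str.len ((PySem.List.pyGet? grid 0).getD "")
  (PySem.List.pyRange 0 w 1).foldl (fun result x =>
    let col := (PySem.List.pyRange 0 h 1).map (fun y =>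
      (PySem.Str.pyGet? (PySem.List.pyGetD grid y "") x).getD ' ')
    if col.all (fun c => c == '.') then PySem.Set.add result x else result) []

-- ===== PORT B =====
def empty_x_alt (grid : List String) : List Int :=
  let w : Int := PySem.Str.len ((PySem.List.pyGet? grid 0).getD "")
  grid.foldl (fun result row =>
    (PySem.List.enumerate row.toList 0).foldl (fun r p =>
      if p.2 == '.' then r else PySem.Set.discard r p.1) result)
    (PySem.Set.ofList (PySem.List.pyRange 0 w 1))

-- ===== PRECONDITION & SPEC =====
-- A raises IndexError exactly on the empty grid and on grids where some row is shorter than the first row.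
def Pre_empty_x (grid : List String) : Prop :=
  grid ≠ [] ∧ ∀ s ∈ grid, PySem.Str.len (grid.headD "") ≤ PySem.Str.len s
instance (grid : List String) : Decidable (Pre_empty_x grid) := by unfold Pre_empty_x; infer_instance
def pvWitness_empty_x : List String := ["#.", ".."]

def Spec_empty_x (grid : List String) (out : List Int) : Prop := out = empty_x_alt grid
instance (grid : List String) (out : List Int) : Decidable (Spec_empty_x grid out) := by unfold Spec_empty_x; infer_instance

-- ===== CLAIM (what is proved, stated in full; the proofs are below) =====
def Claim_equal_empty_x : Prop := ∀ (grid : List String), Dom_empty_x grid → Pre_empty_x grid → Spec_empty_x grid (empty_x grid)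

-- ===== LEMMAS AND PROOFS =====

-- A's accumulation loop over a Nodup list of fresh elements appends the filtered list.
theorem pv_foldA (l : List Int) (p : Int → Bool) (acc : List Int)
    (hf : ∀ x ∈ l, x ∉ acc) (hn : l.Nodup) :
    l.foldl (fun r x => if p x then PySem.Set.add r x else r) acc = acc ++ l.filter p := by
  induction l generalizing acc with
  | nil => simp
  | cons a t ih =>
    rw [List.nodup_cons] at hn
    cases hp : p a
    · simp only [List.foldl_cons, hp, Bool.false_eq_true, if_false, List.filter_cons]
      rw [ih acc (fun x hx => hf x (List.mem_cons_of_mem _ hx)) hn.2]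
    · have hadd : PySem.Set.add acc a = acc ++ [a] := by
        simp [PySem.Set.add, List.contains_eq_mem, hf a (by simp)]
      simp only [List.foldl_cons, hp, if_true, hadd, List.filter_cons]
      rw [ih (acc ++ [a]) (by
        intro x hx
        simp only [List.mem_append, List.mem_singleton]
        rintro (h | rfl)
        · exact hf x (List.mem_cons_of_mem _ hx) h
        · exact hn.1 hx) hn.2]
      simp

-- B's inner loop over one row's enumerate is a filter of the candidate list.
theorem pv_foldRow (cs : List Char) (s : Int) (r : List Int) :
    (PySem.List.enumerate cs s).foldl (fun r p =>
        if p.2 == '.' then r else PySem.Set.discard r p.1) r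
      = r.filter (fun x => (PySem.List.enumerate cs s).all (fun p => p.2 == '.' || !(x == p.1))) := by
  induction cs generalizing s r with
  | nil => simp [PySem.List.enumerate]
  | cons c t ih =>
    rw [PySem.List.enumerate_cons]
    cases hc : (c == '.')
    · simp only [List.foldl_cons, hc, Bool.false_eq_true, if_false, List.all_cons]
      rw [ih (s + 1) (PySem.Set.discard r s)]
      simp only [PySem.Set.discard, List.filter_filter]
      apply List.filter_congr
      intro x _
      simp only [Bool.false_or]
      cases h : (x == s) <;> simp [h]
    · simp only [List.foldl_cons, hc, if_true, List.all_cons]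
      rw [ih (s + 1) r]
      apply List.filter_congr
      intro x _
      simp

-- B's outer loop over the rows is a filter of the initial candidate list.
theorem pv_foldGrid (rows : List String) (init : List Int) :
    rows.foldl (fun result row =>
        (PySem.List.enumerate row.toList 0).foldl (fun r p =>
          if p.2 == '.' then r else PySem.Set.discard r p.1) result) init
      = init.filter (fun x => rows.all (fun row =>
          (PySem.List.enumerate row.toList 0).all (fun p => p.2 == '.' || !(x == p.1)))) := by
  induction rows generalizing init with
  | nil => simp
  | cons g t ih =>
    simp only [List.foldl_cons, List.all_cons]
    rw [pv_foldRow, ih, List.filter_filter]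
    apply List.filter_congr
    intro x _
    exact Bool.and_comm _ _

-- all_congr with a membership hypothesis (row ∈ grid is needed for the length bound).
theorem pv_all_congr {α : Type} (l : List α) (p q : α → Bool) (h : ∀ x ∈ l, p x = q x) :
    l.all p = l.all q := by
  induction l with
  | nil => rfl
  | cons a t ih =>
    simp only [List.all_cons, h a (by simp),
      ih (fun x hx => h x (List.mem_cons_of_mem _ hx))]

-- For an in-range column x of a row, B's per-row test reduces to "the cell at x is '.'".
theorem pv_rowPred (cs : List Char) (x : Int) (hx0 : 0 ≤ x) (hxl : x.toNat < cs.length) :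
    (PySem.List.enumerate cs 0).all (fun p => p.2 == '.' || !(x == p.1))
      = (cs[x.toNat] == '.') := by
  have hmem : ((x, cs[x.toNat]) : Int × Char) ∈ PySem.List.enumerate cs 0 := by
    rw [PySem.List.mem_enumerate_iff]
    exact ⟨x.toNat, hxl, by simp [Int.toNat_of_nonneg hx0]⟩
  cases h : (cs[x.toNat] == '.')
  · refine List.all_eq_false.mpr ⟨(x, cs[x.toNat]), hmem, ?_⟩
    simp [h]
  · refine List.all_eq_true.mpr ?_
    intro p hp
    rw [PySem.List.mem_enumerate_iff] at hp
    obtain ⟨k, hk, rfl⟩ := hp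
    by_cases hxk : x = 0 + (k : Int)
    · have hkx : k = x.toNat := by omega
      subst hkx
      simp [h]
    · simp only [Bool.or_eq_true, Bool.not_eq_eq_eq_not, Bool.not_true, beq_eq_false_iff_ne]
      exact Or.inr (by omega)

-- ===== VERDICT (by name: the statement is the Claim_ definition above) =====
theorem empty_x_spec : Claim_equal_empty_x := by
  intro grid _ hpre
  obtain ⟨hne, hlen⟩ := hpre
  obtain ⟨g0, rest, rfl⟩ := List.exists_cons_of_ne_nil hne
  unfold Spec_empty_x empty_x empty_x_alt
  simp only []
  have hget : PySem.List.pyGet? (g0 :: rest) 0 = some g0 := PySem.List.pyGet?_zero_cons g0 rest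
  rw [hget]
  simp only [Option.getD_some]
  -- B side
  rw [pv_foldGrid]
  rw [PySem.Set.ofList_eq_self_of_nodup _ (PySem.List.nodup_pyRange_one 0 (PySem.Str.len g0))]
  -- A side: the column comprehension is grid.map (cell at x)
  have hcol : ∀ x : Int,
      (PySem.List.pyRange 0 (((g0 :: rest).length : Int)) 1).map (fun y =>
        (PySem.Str.pyGet? (PySem.List.pyGetD (g0 :: rest) y "") x).getD ' ')
      = (g0 :: rest).map (fun row => (PySem.Str.pyGet? row x).getD ' ') := by
    intro x
    have : (fun y => (PySem.Str.pyGet? (PySem.List.pyGetD (g0 :: rest) y "") x).getD ' ')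
        = (fun row => (PySem.Str.pyGet? row x).getD ' ') ∘ (fun y => PySem.List.pyGetD (g0 :: rest) y "") := rfl
    rw [this, ← List.map_map, PySem.List.map_pyGetD_pyRange_zero' (g0 :: rest) ""]
  rw [pv_foldA _ _ [] (by simp) (PySem.List.nodup_pyRange_one 0 (PySem.Str.len g0))]
  rw [List.nil_append]
  apply List.filter_congr
  intro x hx
  rw [PySem.List.mem_pyRange_one] at hx
  rw [hcol x, List.all_map]
  apply pv_all_congr
  intro row hrow
  simp only [Function.comp_apply]
  have hw : PySem.Str.len g0 ≤ PySem.Str.len row := hlen row hrow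
  have hxl : x.toNat < row.toList.length := by
    simp only [PySem.Str.len] at hx hw
    omega
  rw [pv_rowPred row.toList x hx.1 hxl]
  have hsome : PySem.Str.pyGet? row x = some row.toList[x.toNat] := by
    simp only [PySem.Str.pyGet?_eq, PySem.Chars.pyGet?_eq_listPyGet?]
    exact PySem.List.pyGet?_eq_some_getElem row.toList hx.1 (by
      simp only [PySem.Str.len] at *
      omega)
  rw [hsome, Option.getD_some]
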